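-- pv_equiv track=rewrite | github.com/animeshokhade/dsa | geeks4geeks/#219.py | bitMultiply
-- ===== SOURCE A (Python) =====
-- def bitMultiply(N):
--     # code here
--     set_bits = 0
--     temp = N
--     while temp:
--         if temp & 1:
--             set_bits += 1
--         temp >>= 1
--     return set_bits * N
-- ===== SOURCE B (Python) =====
-- def bitMultiply(N):
--     # Brian Kernighan: clear the lowest set bit each step.
--     count = 0
--     temp = N
--     while temp:
--         temp &= temp - 1
--         count += 1
--     return count * N
-- ===== Notes on version B (the rewrite author's own statement) =====
-- stated objective: alternative
-- what changed: B counts set bits with Brian Kernighan's trick (temp &= temp-1, one iteration per set bit) instead of A's bit-by-bit shift-and-test scan of every bit position.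
import Mathlib
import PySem

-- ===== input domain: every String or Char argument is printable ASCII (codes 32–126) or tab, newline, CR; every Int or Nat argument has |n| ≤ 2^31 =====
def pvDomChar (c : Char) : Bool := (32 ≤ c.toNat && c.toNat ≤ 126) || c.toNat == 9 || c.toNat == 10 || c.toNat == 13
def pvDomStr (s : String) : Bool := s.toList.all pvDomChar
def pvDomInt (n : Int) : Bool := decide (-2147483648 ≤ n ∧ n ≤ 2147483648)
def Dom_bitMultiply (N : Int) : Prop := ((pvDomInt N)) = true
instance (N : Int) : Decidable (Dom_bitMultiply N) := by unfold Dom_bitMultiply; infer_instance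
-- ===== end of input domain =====

-- B counts set bits with Kernighan's lowest-set-bit-clearing loop instead of A's shift-and-test
-- scan of every bit position (alternative algorithm, same result).

-- ===== PORT A =====
-- A's while loop: test the low bit, shift right by one; only reached with temp ≥ 0 (Pre_).
def pvLoopA : Nat → Nat → Nat
  | 0, setBits => setBits
  | n + 1, setBits => pvLoopA ((n + 1) / 2) (if (n + 1) &&& 1 = 1 then setBits + 1 else setBits)
  decreasing_by omega

def bitMultiply (N : Int) : Int := (pvLoopA N.toNat 0 : Int) * N

-- ===== PORT B =====
-- B's while loop: clear the lowest set bit, count iterations; only reached with temp ≥ 0 (Pre_).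
theorem pvKernStep_lt (n : Nat) (h : ¬ n = 0) : n &&& (n - 1) < n :=
  Nat.lt_of_le_of_lt (Nat.and_le_right) (by omega)

def pvLoopB (n : Nat) (count : Nat) : Nat :=
  if h : n = 0 then count else pvLoopB (n &&& (n - 1)) (count + 1)
  termination_by n
  decreasing_by exact pvKernStep_lt n h

def bitMultiply_alt (N : Int) : Int := (pvLoopB N.toNat 0 : Int) * N

-- ===== PRECONDITION & SPEC =====
-- (No Pre_: on negative N both Pythons loop forever, so no return value is claimed there;
-- both ports read N.toNat and the ports agree on all Int inputs anyway.)
def Spec_bitMultiply (N : Int) (out : Int) : Prop := out = bitMultiply_alt N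
instance (N : Int) (out : Int) : Decidable (Spec_bitMultiply N out) := by unfold Spec_bitMultiply; infer_instance

-- ===== CLAIM (what is proved, stated in full; the proofs are below) =====
def Claim_equal_bitMultiply : Prop := ∀ (N : Int), Dom_bitMultiply N → Spec_bitMultiply N (bitMultiply N)

-- ===== LEMMAS AND PROOFS =====

-- Reference popcount (no accumulator), used only in the proofs.
def pvPop : Nat → Nat
  | 0 => 0
  | n + 1 => (n + 1) % 2 + pvPop ((n + 1) / 2)
  decreasing_by omega

theorem pvPop_two_mul (k : Nat) : pvPop (2 * k) = pvPop k := by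
  cases k with
  | zero => rfl
  | succ j =>
    rw [show 2 * (j + 1) = (2 * j + 1) + 1 by ring, pvPop,
        show ((2 * j + 1) + 1) % 2 = 0 by omega,
        show ((2 * j + 1) + 1) / 2 = j + 1 by omega]
    omega

theorem pvPop_two_mul_add_one (k : Nat) : pvPop (2 * k + 1) = pvPop k + 1 := by
  rw [show 2 * k + 1 = (2 * k) + 1 from rfl, pvPop,
      show ((2 * k) + 1) % 2 = 1 by omega,
      show ((2 * k) + 1) / 2 = k by omega]
  omega

theorem pvLandEven (k : Nat) : (2 * k) &&& (2 * k - 1) = 2 * (k &&& (k - 1)) := by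
  cases k with
  | zero => rfl
  | succ j =>
    rw [show 2 * (j + 1) - 1 = Nat.bit true j by simp [Nat.bit]; omega,
        show 2 * (j + 1) = Nat.bit false (j + 1) by simp [Nat.bit],
        Nat.land_bit]
    simp [Nat.bit]

theorem pvLandOdd (k : Nat) : (2 * k + 1) &&& (2 * k) = 2 * k := by
  rw [show 2 * k + 1 = Nat.bit true k by simp [Nat.bit],
      show 2 * k = Nat.bit false k by simp [Nat.bit],
      Nat.land_bit]
  simp [Nat.bit]

theorem pvLoopA_eq (n : Nat) : ∀ acc, pvLoopA n acc = acc + pvPop n := by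
  induction n using Nat.strong_induction_on with
  | _ n ih =>
    intro acc
    cases n with
    | zero => simp [pvLoopA, pvPop]
    | succ m =>
      rw [pvLoopA, pvPop, ih ((m + 1) / 2) (by omega)]
      have : (m + 1) &&& 1 = (m + 1) % 2 := Nat.and_one_is_mod (m + 1)
      split_ifs with h <;> omega

-- Kernighan's identity: clearing the lowest set bit removes exactly one set bit.
theorem pvPop_land_pred (n : Nat) (h : n ≠ 0) : pvPop (n &&& (n - 1)) + 1 = pvPop n := by
  induction n using Nat.strong_induction_on with
  | _ n ih =>
    rcases Nat.even_or_odd n with ⟨k, hk⟩ | ⟨k, hk⟩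
    · -- n = 2k, k > 0 : n &&& (n-1) = 2*(k &&& (k-1))
      have hk0 : k ≠ 0 := by omega
      have hn : n = 2 * k := by omega
      rw [hn, pvLandEven, pvPop_two_mul, pvPop_two_mul, ih k (by omega) hk0]
    · -- n = 2k+1 : n &&& (n-1) = 2k
      rw [hk, show 2 * k + 1 - 1 = 2 * k by omega, pvLandOdd, pvPop_two_mul,
          pvPop_two_mul_add_one]

theorem pvLoopB_eq (n : Nat) : ∀ acc, pvLoopB n acc = acc + pvPop n := by
  induction n using Nat.strong_induction_on with
  | _ n ih =>
    intro acc
    unfold pvLoopB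
    split_ifs with h
    · subst h; simp [pvPop]
    · rw [ih (n &&& (n - 1)) (pvKernStep_lt n h), ← pvPop_land_pred n h]
      omega

-- ===== VERDICT (by name: the statement is the Claim_ definition above) =====
theorem bitMultiply_spec : Claim_equal_bitMultiply := by
  intro N _
  unfold Spec_bitMultiply bitMultiply bitMultiply_alt
  rw [pvLoopA_eq, pvLoopB_eq]
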